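-- pv_equiv track=rewrite | github.com/jamesbooth93/project-test | scenario_copy.py | weekly_tactical_quality
-- ===== SOURCE A (Python) =====
-- def weekly_tactical_quality(snapshot):
--     actions = (snapshot or {}).get("actions_taken", [])
--     if not actions:
--         return "no_action"
--     qualities = {action.get("authored_quality") for action in actions if action.get("authored_quality")}
--     if "strong" in qualities:
--         return "strong"
--     if "acceptable" in qualities:
--         return "acceptable"
--     return "weak"
-- ===== SOURCE B (Python) =====
-- def weekly_tactical_quality(snapshot):
--     actions = (snapshot or {}).get("actions_taken", [])
--     if not actions:
--         return "no_action"
--     rank = {"strong": 2, "acceptable": 1}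
--     best = max(rank.get(a.get("authored_quality"), 0) for a in actions)
--     return "strong" if best == 2 else "acceptable" if best == 1 else "weak"
-- ===== Notes on version B (the rewrite author's own statement) =====
-- stated objective: simpler
-- what changed: Replaced the set comprehension plus ordered membership tests with a single numeric max reduction over a rank map (strong=2, acceptable=1, other=0) translated back to a label.
import Mathlib
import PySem

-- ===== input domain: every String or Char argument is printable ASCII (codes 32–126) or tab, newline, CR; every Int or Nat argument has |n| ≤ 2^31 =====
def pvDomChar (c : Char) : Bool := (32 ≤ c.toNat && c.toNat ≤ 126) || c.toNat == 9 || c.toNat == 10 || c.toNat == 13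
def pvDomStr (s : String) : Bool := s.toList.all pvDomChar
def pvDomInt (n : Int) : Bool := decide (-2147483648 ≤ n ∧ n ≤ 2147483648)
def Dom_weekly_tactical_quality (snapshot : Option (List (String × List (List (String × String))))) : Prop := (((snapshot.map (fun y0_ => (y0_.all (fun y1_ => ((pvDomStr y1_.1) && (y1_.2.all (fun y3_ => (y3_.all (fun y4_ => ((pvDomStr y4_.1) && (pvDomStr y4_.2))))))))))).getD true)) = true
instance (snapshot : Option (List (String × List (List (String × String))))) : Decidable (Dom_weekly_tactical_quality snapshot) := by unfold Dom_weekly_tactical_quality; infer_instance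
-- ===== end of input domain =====

-- B replaces A's set-build-then-ordered-membership tests with a single numeric max
-- reduction over a rank map (strong=2, acceptable=1, other=0); objective: simpler.


-- ===== PORT A =====
-- (snapshot or {}).get("actions_taken", []): 'snapshot or {}' turns None (and the
-- falsy empty dict, whose lookup yields the same default) into {}; dict lookup is
-- first match on the association list (PySem.Dict.mk).
def pvActions (snapshot : Option (List (String × List (List (String × String))))) :
    List (List (String × String)) :=
  (PySem.Dict.mk (snapshot.getD [])).getD "actions_taken" []

-- action.get("authored_quality")
def pvQual (a : List (String × String)) : Option String :=
  (PySem.Dict.mk a).get? "authored_quality"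

-- one step of the set comprehension: add action.get("authored_quality") if truthy
def pvStep (s : PySem.Set String) (a : List (String × String)) : PySem.Set String :=
  match pvQual a with
  | some q => if q ≠ "" then PySem.Set.add s q else s
  | none => s

def weekly_tactical_quality (snapshot : Option (List (String × List (List (String × String))))) : String :=
  let actions := pvActions snapshot
  if actions = [] then "no_action"
  else
    -- {action.get("authored_quality") for action in actions if action.get("authored_quality")}
    let qualities : PySem.Set String := actions.foldl pvStep PySem.Set.empty
    if qualities.contains "strong" then "strong"
    else if qualities.contains "acceptable" then "acceptable"
    else "weak"

-- ===== PORT B =====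
def pvRank : PySem.Dict (Option String) Int :=
  PySem.Dict.mk [(some "strong", 2), (some "acceptable", 1)]

def weekly_tactical_quality_alt (snapshot : Option (List (String × List (List (String × String))))) : String :=
  let actions := pvActions snapshot
  if actions = [] then "no_action"
  else
    -- max(rank.get(a.get("authored_quality"), 0) for a in actions)
    let best : Int :=
      match actions.map (fun a => pvRank.getD (pvQual a) 0) with
      | [] => 0
      | h :: t => t.foldl max h
    if best = 2 then "strong" else if best = 1 then "acceptable" else "weak"

-- ===== PRECONDITION & SPEC =====
def Spec_weekly_tactical_quality (snapshot : Option (List (String × List (List (String × String))))) (out : String) : Prop := out = weekly_tactical_quality_alt snapshot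
instance (snapshot : Option (List (String × List (List (String × String))))) (out : String) : Decidable (Spec_weekly_tactical_quality snapshot out) := by unfold Spec_weekly_tactical_quality; infer_instance

-- ===== CLAIM (what is proved, stated in full; the proofs are below) =====
def Claim_equal_weekly_tactical_quality : Prop := ∀ (snapshot : Option (List (String × List (List (String × String))))), Dom_weekly_tactical_quality snapshot → Spec_weekly_tactical_quality snapshot (weekly_tactical_quality snapshot)

-- ===== LEMMAS AND PROOFS =====

-- rank value of one action
def pvF (a : List (String × String)) : Int := pvRank.getD (pvQual a) 0

lemma pvF_cases (a : List (String × String)) :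
    pvF a = if pvQual a = some "strong" then 2
            else if pvQual a = some "acceptable" then 1 else 0 := by
  unfold pvF pvRank
  rcases h : pvQual a with _ | q
  · simp [PySem.Dict.getD, PySem.Dict.get?]
  · by_cases h1 : q = "strong"
    · subst h1; simp [PySem.Dict.getD, PySem.Dict.get?, List.find?]
    · by_cases h2 : q = "acceptable"
      · subst h2; simp [PySem.Dict.getD, PySem.Dict.get?, List.find?]
      · have e1 : ("strong" == q) = false := beq_eq_false_iff_ne.mpr (fun hh => h1 hh.symm)
        have e2 : ("acceptable" == q) = false := beq_eq_false_iff_ne.mpr (fun hh => h2 hh.symm)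
        simp [PySem.Dict.getD, PySem.Dict.get?, List.find?, e1, e2, h1, h2]

lemma mem_pvStep (s : PySem.Set String) (a : List (String × String))
    (q : String) (hq : q ≠ "") :
    q ∈ pvStep s a ↔ q ∈ s ∨ pvQual a = some q := by
  unfold pvStep
  rcases h : pvQual a with _ | q'
  · simp
  · show (q ∈ if q' ≠ "" then PySem.Set.add s q' else s) ↔ q ∈ s ∨ some q' = some q
    by_cases h0 : q' = ""
    · subst h0
      simp only [ne_eq, not_true_eq_false, if_false, Option.some.injEq]
      exact ⟨Or.inl, fun h' => h'.elim id (fun e => absurd e.symm hq)⟩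
    · rw [if_pos h0, PySem.Set.mem_add]
      simp [eq_comm]

-- membership in A's qualities set characterised, for a nonempty target string
lemma mem_qfold (acts : List (List (String × String))) (s : PySem.Set String)
    (q : String) (hq : q ≠ "") :
    q ∈ acts.foldl pvStep s ↔ q ∈ s ∨ ∃ a ∈ acts, pvQual a = some q := by
  induction acts generalizing s with
  | nil => simp
  | cons a t ih =>
    rw [List.foldl_cons, ih, mem_pvStep s a q hq]
    constructor
    · rintro ((h | h) | ⟨b, hb, hbq⟩)
      · exact Or.inl h
      · exact Or.inr ⟨a, List.mem_cons_self, h⟩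
      · exact Or.inr ⟨b, List.mem_cons_of_mem _ hb, hbq⟩
    · rintro (h | ⟨b, hb, hbq⟩)
      · exact Or.inl (Or.inl h)
      · rcases List.mem_cons.1 hb with rfl | hb
        · exact Or.inl (Or.inr hbq)
        · exact Or.inr ⟨b, hb, hbq⟩

-- ===== VERDICT (by name: the statement is the Claim_ definition above) =====

theorem weekly_tactical_quality_spec : Claim_equal_weekly_tactical_quality := by
  intro snapshot _
  unfold Spec_weekly_tactical_quality weekly_tactical_quality weekly_tactical_quality_alt
  rcases hacts : pvActions snapshot with _ | ⟨a0, acts⟩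
  · simp
  · simp only [List.map_cons, reduceCtorEq, if_false]
    set best := List.foldl max (pvRank.getD (pvQual a0) 0)
        (List.map (fun a => pvRank.getD (pvQual a) 0) acts) with hB
    set qs := List.foldl pvStep PySem.Set.empty (a0 :: acts) with hQ
    -- best is the value of some action; every action's value ≤ best
    have hmem := PySem.List.foldl_max_mem
        (List.map (fun a => pvRank.getD (pvQual a) 0) acts) (pvRank.getD (pvQual a0) 0)
    have hub := PySem.List.le_foldl_max
        (List.map (fun a => pvRank.getD (pvQual a) 0) acts) (pvRank.getD (pvQual a0) 0)
    rw [← hB] at hmem hub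
    have hbmem : ∃ a ∈ a0 :: acts, pvF a = best := by
      rcases hmem with h | h
      · exact ⟨a0, List.mem_cons_self, h.symm⟩
      · rcases List.mem_map.1 h with ⟨a, ha, hfa⟩
        exact ⟨a, List.mem_cons_of_mem _ ha, hfa⟩
    have hball : ∀ a ∈ a0 :: acts, pvF a ≤ best := by
      intro a ha
      rcases List.mem_cons.1 ha with rfl | ha
      · exact hub.1
      · exact hub.2 _ (List.mem_map.2 ⟨a, ha, rfl⟩)
    -- A's set membership characterised
    have hS := mem_qfold (a0 :: acts) PySem.Set.empty "strong" (by decide)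
    have hA := mem_qfold (a0 :: acts) PySem.Set.empty "acceptable" (by decide)
    rw [← hQ] at hS hA
    simp only [PySem.Set.empty, List.not_mem_nil, false_or] at hS hA
    by_cases hstr : ∃ a ∈ a0 :: acts, pvQual a = some "strong"
    · have m1 : "strong" ∈ qs := hS.2 hstr
      have hb2 : best = 2 := by
        rcases hstr with ⟨a, ha, hq⟩
        have h2 : pvF a = 2 := by rw [pvF_cases, hq]; simp
        have hle : (2 : Int) ≤ best := h2 ▸ hball a ha
        rcases hbmem with ⟨b, hb, hfb⟩
        have : pvF b ≤ 2 := by rw [pvF_cases]; split_ifs <;> omega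
        omega
      simp [m1, hB.symm.trans hb2]
    · have hne2 : ∀ a ∈ a0 :: acts, pvF a ≠ 2 ∧ pvF a ≤ 1 := by
        intro a ha
        rw [pvF_cases]
        split_ifs with h1 h2
        · exact absurd ⟨a, ha, h1⟩ hstr
        · omega
        · omega
      have m1 : "strong" ∉ qs := fun h => hstr (hS.1 h)
      by_cases hacc : ∃ a ∈ a0 :: acts, pvQual a = some "acceptable"
      · have m2 : "acceptable" ∈ qs := hA.2 hacc
        have hb1 : best = 1 := by
          rcases hacc with ⟨a, ha, hq⟩
          have h1 : pvF a = 1 := by rw [pvF_cases, hq]; simp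
          have hle : (1 : Int) ≤ best := h1 ▸ hball a ha
          rcases hbmem with ⟨b, hb, hfb⟩
          have := (hne2 b hb).2
          omega
        simp [m1, m2, hB.symm.trans hb1]
      · have m2 : "acceptable" ∉ qs := fun h => hacc (hA.1 h)
        have hb0 : best = 0 := by
          rcases hbmem with ⟨b, hb, hfb⟩
          have : pvF b = 0 := by
            rw [pvF_cases]
            split_ifs with h1 h2
            · exact absurd ⟨b, hb, h1⟩ hstr
            · exact absurd ⟨b, hb, h2⟩ hacc
            · rfl
          omega
        simp [m1, m2, hB.symm.trans hb0]
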